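-- pv_equiv track=rewrite | github.com/FirstGameGG/PythonProg | DecodeKid.py | decode_lucas
-- ===== SOURCE A (Python) =====
-- def decode_lucas(text):
--     vowels = 'aeiou'
--     new_text = ""
--     skip = 0
--
--     for i in range(len(text)):
--         if skip:
--             skip -= 1
--             continue
--         if text[i] in vowels and i+2 < len(text) and text[i+1] == 'p' and text[i+2] == text[i]:
--             new_text += text[i]
--             skip = 2
--         else:
--             new_text += text[i]
--
--     return new_text
-- ===== SOURCE B (Python) =====
-- def decode_lucas(text):
--     j = text.find('p', 1)
--     while j != -1:
--         if j + 1 < len(text) and text[j - 1] in 'aeiou' and text[j + 1] == text[j - 1]: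
--             return text[:j] + decode_lucas(text[j + 2:])
--         j = text.find('p', j + 1)
--     return text
-- ===== Notes on version B (the rewrite author's own statement) =====
-- stated objective: faster
-- what changed: Replaces A's per-character skip-counter state machine by repeated leftmost-match substitution: str.find jumps directly to the next candidate separator letter, the vowel backreference condition is checked there, and on a match the string is spliced (prefix kept, the separator and repeated vowel cut) with decoding recursing on the remainder -- a hand-rolled regex-sub.
import Mathlib
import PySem

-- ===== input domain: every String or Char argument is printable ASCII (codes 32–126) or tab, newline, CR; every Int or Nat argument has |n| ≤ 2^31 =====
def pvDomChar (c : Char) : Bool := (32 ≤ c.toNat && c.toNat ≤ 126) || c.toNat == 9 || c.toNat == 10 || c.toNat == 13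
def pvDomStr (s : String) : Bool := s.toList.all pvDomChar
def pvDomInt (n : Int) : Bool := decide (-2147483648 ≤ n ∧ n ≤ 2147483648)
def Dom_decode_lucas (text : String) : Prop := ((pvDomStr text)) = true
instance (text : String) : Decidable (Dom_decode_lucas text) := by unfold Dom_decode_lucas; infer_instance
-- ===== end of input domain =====

-- B replaces A's one-pass skip-counter state machine by repeated leftmost-match substitution
-- (find the next 'p', check the vowel backreference, splice and recurse); same return value.

-- ===== PORT A =====
-- one iteration of A's for-loop body; state = (new_text as chars, skip)
def aStep (cs : List Char) (st : List Char × Int) (i : Int) : List Char × Int :=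
  if st.2 ≠ 0 then (st.1, st.2 - 1)
  else
    match PySem.List.pyGet? cs i with
    | none => st  -- unreachable: i ranges over range(len(text))
    | some c =>
      -- `text[i] in vowels` on the single char text[i] is membership of that char in "aeiou"
      if c ∈ "aeiou".toList ∧ i + 2 < (cs.length : Int) ∧
          PySem.List.pyGet? cs (i + 1) = some 'p' ∧ PySem.List.pyGet? cs (i + 2) = some c then
        (st.1 ++ [c], 2)
      else
        (st.1 ++ [c], st.2)

def decode_lucas (text : String) : String :=
  let cs := text.toList
  let res := (PySem.List.pyRange 0 (cs.length : Int) 1).foldl (aStep cs) ([], 0)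
  String.ofList res.1

-- ===== PORT B =====
-- B's `while j != -1` loop (advancing j with text.find('p', j+1)) plus the recursive splice
-- `text[:j] + decode_lucas(text[j+2:])`, transliterated with a fuel counter that only makes the
-- combined recursion total (2*len+2 always suffices; the 0 branch is unreachable).
def bGo (fuel : Nat) (cs : List Char) (j : Int) : List Char :=
  match fuel with
  | 0 => []
  | fuel + 1 =>
    if j = -1 then cs
    else if j + 1 < (cs.length : Int) ∧
            (PySem.List.pyGet? cs (j - 1)).any (fun c => "aeiou".toList.contains c) = true ∧
            PySem.List.pyGet? cs (j + 1) = PySem.List.pyGet? cs (j - 1) then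
      PySem.List.slice cs none (some j) ++
        bGo fuel (PySem.List.slice cs (some (j + 2)) none)
          (PySem.Chars.findFrom (PySem.List.slice cs (some (j + 2)) none) ['p'] 1 none)
    else
      bGo fuel cs (PySem.Chars.findFrom cs ['p'] (j + 1) none)

def decode_lucas_alt (text : String) : String :=
  let cs := text.toList
  String.ofList (bGo (2 * cs.length + 2) cs (PySem.Chars.findFrom cs ['p'] 1 none))

-- ===== PRECONDITION & SPEC =====
def Spec_decode_lucas (text : String) (out : String) : Prop := out = decode_lucas_alt text
instance (text : String) (out : String) : Decidable (Spec_decode_lucas text out) := by unfold Spec_decode_lucas; infer_instance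

-- ===== CLAIM (what is proved, stated in full; the proofs are below) =====
def Claim_equal_decode_lucas : Prop := ∀ (text : String), Dom_decode_lucas text → Spec_decode_lucas text (decode_lucas text)

-- ===== LEMMAS AND PROOFS =====

-- Proof-side intermediate: the structural recursion both ports compute.
def altGo : List Char → List Char
  | [] => []
  | [c] => [c]
  | [c, d] => [c, d]
  | c :: p :: d :: rest =>
    if c ∈ "aeiou".toList ∧ p = 'p' ∧ d = c then c :: altGo rest
    else c :: altGo (p :: d :: rest)

-- does the list start with an encoded triple v 'p' v ?
def matchHead : List Char → Prop
  | c :: p :: d :: _ => c ∈ "aeiou".toList ∧ p = 'p' ∧ d = c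
  | _ => False

theorem matchHead_iff (l : List Char) :
    matchHead l ↔ ∃ c, l[0]? = some c ∧ c ∈ "aeiou".toList ∧ l[1]? = some 'p' ∧ l[2]? = some c := by
  match l with
  | [] => simp [matchHead]
  | [c] => simp [matchHead]
  | [c, d] => simp [matchHead]
  | c :: p :: d :: r =>
    simp only [matchHead, List.getElem?_cons_zero, List.getElem?_cons_succ]
    constructor
    · rintro ⟨h1, h2, h3⟩; exact ⟨c, rfl, h1, by simp [h2], by simp [h3]⟩
    · rintro ⟨x, hx, h1, h2, h3⟩
      cases hx; simp only [Option.some.injEq] at h2 h3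
      exact ⟨h1, h2, h3⟩

theorem altGo_head (c : Char) (r : List Char) (h : ¬ matchHead (c :: r)) :
    altGo (c :: r) = c :: altGo r := by
  match r with
  | [] => simp [altGo]
  | [d] => simp [altGo]
  | p :: d :: t => rw [altGo.eq_4, if_neg (by exact h)]

theorem altGo_match (c p d : Char) (r : List Char) (h : matchHead (c :: p :: d :: r)) :
    altGo (c :: p :: d :: r) = c :: altGo r := by
  rw [altGo.eq_4]
  exact if_pos h

theorem altGo_no_match (cs : List Char) (h : ∀ s, ¬ matchHead (cs.drop s)) :
    altGo cs = cs := by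
  induction cs with
  | nil => simp [altGo]
  | cons c r ih =>
    rw [altGo_head c r (h 0), ih (fun s => by simpa using h (s + 1))]

theorem altGo_first_match : ∀ (m : Nat) (cs : List Char),
    (∀ s < m, ¬ matchHead (cs.drop s)) → matchHead (cs.drop m) →
    altGo cs = cs.take (m + 1) ++ altGo (cs.drop (m + 3)) := by
  intro m
  induction m with
  | zero =>
    intro cs _ hm
    match cs with
    | c :: p :: d :: r =>
      simp only [List.drop_zero] at hm
      rw [altGo_match c p d r hm]
      simp
  | succ m ih =>
    intro cs h0 hm
    match cs with
    | [] => simp [List.drop_nil, matchHead] at hm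
    | c :: r =>
      rw [altGo_head c r (h0 0 (Nat.succ_pos m))]
      rw [ih r (fun s hs => by simpa using h0 (s + 1) (by omega)) (by simpa using hm)]
      simp

-- single-character prefix
theorem single_prefix (a : Char) (l : List Char) : [a] <+: l ↔ l[0]? = some a := by
  cases l with
  | nil => simp
  | cons x t =>
    constructor
    · rintro ⟨u, hu⟩; cases hu; simp
    · intro h; simp only [List.getElem?_cons_zero, Option.some.injEq] at h
      exact ⟨t, by rw [h]; rfl⟩

-- findFrom facts specialised to the single char 'p'
theorem findP_neg_one (cs : List Char) (k : Nat) (hk : k ≤ cs.length)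
    (h : PySem.Chars.findFrom cs ['p'] (k : Int) none = -1) :
    ∀ i, k ≤ i → cs[i]? ≠ some 'p' := by
  intro i hi hp
  rw [PySem.Chars.findFrom_natCast_eq_neg_one_iff cs ['p'] k hk] at h
  have h0 : (cs.drop i)[0]? = some 'p' := by
    rw [List.getElem?_drop]; simpa using hp
  have hpre := (single_prefix 'p' (cs.drop i)).2 h0
  have hsuffix : cs.drop i <:+ cs.drop k := by
    have := List.drop_suffix (i - k) (cs.drop k)
    rwa [List.drop_drop, Nat.add_comm, Nat.sub_add_cancel hi] at this
  exact h (hpre.isInfix.trans hsuffix.isInfix)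

theorem findP_spec (cs : List Char) (k : Nat) (hk : k ≤ cs.length)
    (h : PySem.Chars.findFrom cs ['p'] (k : Int) none ≠ -1) :
    let j := PySem.Chars.findFrom cs ['p'] (k : Int) none
    (k : Int) ≤ j ∧ cs[j.toNat]? = some 'p' ∧
      ∀ i, k ≤ i → i < j.toNat → cs[i]? ≠ some 'p' := by
  have H := PySem.Chars.findFrom_natCast_spec cs ['p'] k hk h
  refine ⟨H.1, ?_, ?_⟩
  · have := (single_prefix 'p' _).1 H.2.1
    rwa [List.getElem?_drop, Nat.add_zero] at this
  · intro i h1 h2 hp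
    refine H.2.2 i h1 h2 ((single_prefix 'p' _).2 ?_)
    rw [List.getElem?_drop, Nat.add_zero]; exact hp

-- no 'p' from position k on ⇒ no triple starting at or after k-1 (triples put 'p' at s+1 ≥ k)
theorem no_p_no_match (cs : List Char) (k : Nat) (hnp : ∀ i, k ≤ i → cs[i]? ≠ some 'p')
    (s : Nat) (hs : k ≤ s + 1) : ¬ matchHead (cs.drop s) := by
  rw [matchHead_iff]
  rintro ⟨c, _, _, h2, _⟩
  rw [List.getElem?_drop] at h2
  exact hnp (s + 1) hs h2

theorem no_p_no_match_lt (cs : List Char) (k m : Nat)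
    (hnp : ∀ i, k ≤ i → i < m → cs[i]? ≠ some 'p')
    (s : Nat) (hks : k ≤ s + 1) (hsm : s + 1 < m) : ¬ matchHead (cs.drop s) := by
  rw [matchHead_iff]
  rintro ⟨c, _, _, h2, _⟩
  rw [List.getElem?_drop] at h2
  exact hnp (s + 1) hks hsm h2

-- the main loop invariant: bGo computes altGo
theorem bGo_eq : ∀ (fuel : Nat) (cs : List Char) (j : Int),
    (j = -1 → (∀ s, ¬ matchHead (cs.drop s)) ∧ 1 ≤ fuel) →
    (j ≠ -1 → 1 ≤ j ∧ j.toNat < cs.length ∧ cs[j.toNat]? = some 'p' ∧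
      (∀ s, s + 1 < j.toNat → ¬ matchHead (cs.drop s)) ∧ 2 * cs.length + 2 ≤ fuel + j.toNat) →
    bGo fuel cs j = altGo cs := by
  intro fuel
  induction fuel with
  | zero =>
    intro cs j hneg hpos
    by_cases hj : j = -1
    · exact absurd (hneg hj).2 (by omega)
    · have := (hpos hj).2.2.2.2
      have := (hpos hj).2.1
      omega
  | succ fuel ih =>
    intro cs j hneg hpos
    by_cases hj : j = -1
    · subst hj
      rw [bGo, if_pos rfl, altGo_no_match cs (hneg rfl).1]
    · obtain ⟨hj1, hjlen, hjp, hnom, hfuel⟩ := hpos hj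
      have hjnn : 0 ≤ j := by omega
      have hjto : (j.toNat : Int) = j := Int.toNat_of_nonneg hjnn
      set jn := j.toNat with hjn
      rw [bGo, if_neg hj]
      by_cases hc : j + 1 < (cs.length : Int) ∧
          (PySem.List.pyGet? cs (j - 1)).any (fun c => "aeiou".toList.contains c) = true ∧
          PySem.List.pyGet? cs (j + 1) = PySem.List.pyGet? cs (j - 1)
      · -- match at position jn - 1
        rw [if_pos hc]
        obtain ⟨hlt, hvow, heq⟩ := hc
        have hg1 : PySem.List.pyGet? cs (j - 1) = cs[jn - 1]? := by
          have : j - 1 = ((jn - 1 : Nat) : Int) := by omega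
          rw [this, PySem.List.pyGet?_natCast]
        have hg2 : PySem.List.pyGet? cs (j + 1) = cs[jn + 1]? := by
          have : j + 1 = ((jn + 1 : Nat) : Int) := by omega
          rw [this, PySem.List.pyGet?_natCast]
        rw [hg1] at hvow heq
        rw [hg2] at heq
        obtain ⟨v, hv⟩ : ∃ v, cs[jn - 1]? = some v := by
          cases h : cs[jn - 1]? with
          | none => rw [h] at hvow; simp [Option.any] at hvow
          | some v => exact ⟨v, rfl⟩
        rw [hv] at hvow heq
        have hvmem : v ∈ "aeiou".toList := by
          simpa [Option.any, List.contains_iff_mem] using hvow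
        have hmatch : matchHead (cs.drop (jn - 1)) := by
          rw [matchHead_iff]
          refine ⟨v, ?_, hvmem, ?_, ?_⟩ <;> rw [List.getElem?_drop]
          · simpa using hv
          · have : jn - 1 + 1 = jn := by omega
            rw [this]; exact hjp
          · have : jn - 1 + 2 = jn + 1 := by omega
            rw [this]; exact heq
        have hsplit := altGo_first_match (jn - 1) cs (fun s hs => hnom s (by omega)) hmatch
        have e1 : jn - 1 + 1 = jn := by omega
        have e2 : jn - 1 + 3 = jn + 2 := by omega
        rw [e1, e2] at hsplit
        have hslice1 : PySem.List.slice cs none (some j) = cs.take jn := by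
          rw [← hjto, PySem.List.slice_to_natCast]
        have hslice2 : PySem.List.slice cs (some (j + 2)) none = cs.drop (jn + 2) := by
          have : j + 2 = ((jn + 2 : Nat) : Int) := by omega
          rw [this, PySem.List.slice_from_natCast]
        rw [hslice1, hslice2, hsplit]
        congr 1
        -- recursive call on the dropped tail
        set cs' := cs.drop (jn + 2) with hcs'
        have hlen' : cs'.length = cs.length - (jn + 2) := by simp [hcs']
        have hjlt : jn + 1 < cs.length := by omega
        set j' := PySem.Chars.findFrom cs' ['p'] 1 none with hj'
        by_cases hz : cs' = []
        · have : j' = -1 := by rw [hj', hz]; decide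
          refine (ih cs' j' (fun _ => ⟨fun s => by simp [hz, List.drop_nil, matchHead], by omega⟩)
            (fun hne => absurd this hne)).symm ▸ ?_
          rfl
        · have h1len : 1 ≤ cs'.length := List.length_pos_iff.mpr hz
          by_cases hne : j' = -1
          · refine ih cs' j' (fun _ => ⟨?_, by omega⟩) (fun h => absurd hne h)
            have hnp := findP_neg_one cs' 1 h1len (by push_cast; rw [← hj']; exact hne)
            intro s
            exact no_p_no_match cs' 1 hnp s (by omega)
          · have hspec := findP_spec cs' 1 h1len (by push_cast; rw [← hj']; exact hne)
            push_cast at hspec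
            simp only [← hj'] at hspec
            obtain ⟨hge, hp', hnp'⟩ := hspec
            refine ih cs' j' (fun h => absurd h hne) (fun _ => ⟨by exact_mod_cast hge, ?_, hp', ?_, ?_⟩)
            · by_contra hbig
              rw [List.getElem?_eq_none (by omega)] at hp'
              simp at hp'
            · intro s hs
              exact no_p_no_match_lt cs' 1 j'.toNat hnp' s (by omega) hs
            · have hj'1 : 1 ≤ j'.toNat := by
                have : (1 : Int) ≤ j' := hge
                omega
              have hjlt2 : j + 1 < (cs.length : Int) := hlt
              have : jn + 2 ≤ cs.length := by omega
              omega
      · -- no match at jn - 1; advance j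
        rw [if_neg hc]
        -- the failed condition means ¬ matchHead (cs.drop (jn - 1))
        have hnm : ¬ matchHead (cs.drop (jn - 1)) := by
          rw [matchHead_iff]
          rintro ⟨v, h0, hmem, h1, h2⟩
          rw [List.getElem?_drop] at h0 h1 h2
          simp only [Nat.add_zero] at h0
          have e2 : jn - 1 + 2 = jn + 1 := by omega
          rw [e2] at h2
          apply hc
          have hg1 : PySem.List.pyGet? cs (j - 1) = cs[jn - 1]? := by
            have : j - 1 = ((jn - 1 : Nat) : Int) := by omega
            rw [this, PySem.List.pyGet?_natCast]
          have hg2 : PySem.List.pyGet? cs (j + 1) = cs[jn + 1]? := by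
            have : j + 1 = ((jn + 1 : Nat) : Int) := by omega
            rw [this, PySem.List.pyGet?_natCast]
          have hlen2 : jn + 1 < cs.length := by
            by_contra hn
            rw [List.getElem?_eq_none (by omega)] at h2
            simp at h2
          refine ⟨by omega, ?_, ?_⟩
          · rw [hg1, h0]
            simpa using hmem
          · rw [hg1, hg2, h0, h2]
        set j' := PySem.Chars.findFrom cs ['p'] ((jn + 1 : Nat) : Int) none with hj'
        have hjcast : j + 1 = ((jn + 1 : Nat) : Int) := by omega
        rw [hjcast]
        have hk : jn + 1 ≤ cs.length := by omega
        have hcover : ∀ s, s + 1 < jn + 1 → ¬ matchHead (cs.drop s) := by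
          intro s hs
          rcases Nat.lt_or_ge (s + 1) jn with h | h
          · exact hnom s h
          · have : s = jn - 1 := by omega
            rw [this]; exact hnm
        by_cases hne : j' = -1
        · refine ih cs j' (fun _ => ⟨?_, by omega⟩) (fun h => absurd hne h)
          have hnp := findP_neg_one cs (jn + 1) hk (by rw [← hj']; exact_mod_cast hne)
          intro s
          rcases Nat.lt_or_ge (s + 1) (jn + 1) with h | h
          · exact hcover s h
          · exact no_p_no_match cs (jn + 1) hnp s h
        · have hspec := findP_spec cs (jn + 1) hk (by rw [← hj']; exact_mod_cast hne)
          simp only [← hj'] at hspec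
          obtain ⟨hge, hp', hnp'⟩ := hspec
          refine ih cs j' (fun h => absurd h hne) (fun _ => ⟨by omega, ?_, hp', ?_, ?_⟩)
          · by_contra hbig
            rw [List.getElem?_eq_none (by omega)] at hp'
            simp at hp'
          · intro s hs
            rcases Nat.lt_or_ge (s + 1) (jn + 1) with h | h
            · exact hcover s h
            · exact no_p_no_match_lt cs (jn + 1) j'.toNat hnp' s h hs
          · have : jn + 1 ≤ j'.toNat := by
              have : ((jn + 1 : Nat) : Int) ≤ j' := hge
              omega
            omega

-- B's entry point computes altGo
theorem alt_eq_altGo (cs : List Char) :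
    bGo (2 * cs.length + 2) cs (PySem.Chars.findFrom cs ['p'] 1 none) = altGo cs := by
  by_cases hz : cs = []
  · subst hz; decide
  · have h1len : 1 ≤ cs.length := List.length_pos_iff.mpr hz
    set j0 := PySem.Chars.findFrom cs ['p'] 1 none with hj0
    by_cases hne : j0 = -1
    · refine bGo_eq _ cs j0 (fun _ => ⟨?_, by omega⟩) (fun h => absurd hne h)
      have hnp := findP_neg_one cs 1 h1len (by push_cast; rw [← hj0]; exact hne)
      intro s
      exact no_p_no_match cs 1 hnp s (by omega)
    · have hspec := findP_spec cs 1 h1len (by push_cast; rw [← hj0]; exact hne)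
      push_cast at hspec
      rw [← hj0] at hspec
      obtain ⟨hge, hp', hnp'⟩ := hspec
      refine bGo_eq _ cs j0 (fun h => absurd h hne) (fun _ => ⟨by exact_mod_cast hge, ?_, hp', ?_, ?_⟩)
      · by_contra hbig
        rw [List.getElem?_eq_none (by omega)] at hp'
        simp at hp'
      · intro s hs
        exact no_p_no_match_lt cs 1 j0.toNat hnp' s (by omega) hs
      · have : 1 ≤ j0.toNat := by
          have : (1 : Int) ≤ j0 := by exact_mod_cast hge
          omega
        omega

-- A's loop computes altGo (unchanged from the accepted A-side proof)
theorem decode_loop_eq (suf : List Char) : ∀ (pre acc : List Char),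
    (PySem.List.pyRange (pre.length : Int) ((pre.length + suf.length : Nat) : Int) 1).foldl
      (aStep (pre ++ suf)) (acc, 0) = (acc ++ altGo suf, 0) := by
  induction suf using altGo.induct with
  | case1 =>
    intro pre acc
    rw [PySem.List.pyRange_one_eq_nil (by simp)]
    simp [altGo]
  | case2 c =>
    intro pre acc
    rw [PySem.List.pyRange_one_cons (by simp only [List.length_cons, List.length_nil]; push_cast; omega),
        PySem.List.pyRange_one_eq_nil (by simp only [List.length_cons, List.length_nil]; push_cast; omega)]
    have e1 : PySem.List.pyGet? (pre ++ [c]) (pre.length : Int) = some c :=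
      PySem.List.pyGet?_append_length _ _ _
    have s1 : aStep (pre ++ [c]) (acc, 0) (pre.length : Int) = (acc ++ [c], 0) := by
      unfold aStep
      rw [if_neg (by omega), e1]
      dsimp only
      exact if_neg (by
        simp only [List.length_append, List.length_cons, List.length_nil, not_and]
        intro _
        push_cast; omega)
    simp [s1, altGo]
  | case3 c d =>
    intro pre acc
    rw [PySem.List.pyRange_one_cons (by simp only [List.length_cons, List.length_nil]; push_cast; omega),
        PySem.List.pyRange_one_cons (by simp only [List.length_cons, List.length_nil]; push_cast; omega),
        PySem.List.pyRange_one_eq_nil (by simp only [List.length_cons, List.length_nil]; push_cast; omega)]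
    have e1 : PySem.List.pyGet? (pre ++ [c, d]) (pre.length : Int) = some c :=
      PySem.List.pyGet?_append_length _ _ _
    have e2 : PySem.List.pyGet? (pre ++ [c, d]) ((pre.length : Int) + 1) = some d := by
      simpa using PySem.List.pyGet?_append_right pre [c, d] 1
    have s1 : aStep (pre ++ [c, d]) (acc, 0) (pre.length : Int) = (acc ++ [c], 0) := by
      unfold aStep
      rw [if_neg (by omega), e1]
      dsimp only
      exact if_neg (by
        simp only [List.length_append, List.length_cons, List.length_nil, not_and]
        intro _
        push_cast; omega)
    have s2 : aStep (pre ++ [c, d]) (acc ++ [c], 0) ((pre.length : Int) + 1) = (acc ++ [c, d], 0) := by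
      unfold aStep
      rw [if_neg (by omega), e2]
      dsimp only
      rw [if_neg (by
        simp only [List.length_append, List.length_cons, List.length_nil, not_and]
        intro _
        push_cast; omega)]
      simp
    simp [s1, s2, altGo]
  | case4 c p d rest h ih =>
    intro pre acc
    have e1 : PySem.List.pyGet? (pre ++ c :: p :: d :: rest) (pre.length : Int) = some c :=
      PySem.List.pyGet?_append_length _ _ _
    have e2 : PySem.List.pyGet? (pre ++ c :: p :: d :: rest) ((pre.length : Int) + 1) = some p := by
      simpa using PySem.List.pyGet?_append_right pre (c :: p :: d :: rest) 1
    have e3 : PySem.List.pyGet? (pre ++ c :: p :: d :: rest) ((pre.length : Int) + 2) = some d := by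
      simpa using PySem.List.pyGet?_append_right pre (c :: p :: d :: rest) 2
    rw [PySem.List.pyRange_one_cons (by simp only [List.length_cons]; push_cast; omega),
        PySem.List.pyRange_one_cons (by simp only [List.length_cons]; push_cast; omega),
        PySem.List.pyRange_one_cons (by simp only [List.length_cons]; push_cast; omega)]
    have s1 : aStep (pre ++ c :: p :: d :: rest) (acc, 0) (pre.length : Int) = (acc ++ [c], 2) := by
      unfold aStep
      rw [if_neg (by omega), e1]
      dsimp only
      exact if_pos ⟨h.1, by simp only [List.length_append, List.length_cons]; push_cast; omega,
        by rw [e2, h.2.1], by rw [e3, h.2.2]⟩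
    have s2 : aStep (pre ++ c :: p :: d :: rest) (acc ++ [c], 2) ((pre.length : Int) + 1) = (acc ++ [c], 1) := by
      unfold aStep
      rw [if_pos (by norm_num)]
      norm_num
    have s3 : aStep (pre ++ c :: p :: d :: rest) (acc ++ [c], 1) ((pre.length : Int) + 1 + 1) = (acc ++ [c], 0) := by
      unfold aStep
      rw [if_pos (by norm_num)]
      norm_num
    simp only [List.foldl_cons, s1, s2, s3]
    have H := ih (pre ++ [c, p, d]) (acc ++ [c])
    simp only [List.append_assoc, List.cons_append, List.nil_append, List.length_append,
      List.length_cons, List.length_nil] at H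
    simp only [List.length_cons]
    push_cast at H ⊢
    ring_nf at H ⊢
    rw [altGo.eq_4, if_pos h]
    exact H
  | case5 c p d rest h ih =>
    intro pre acc
    have e1 : PySem.List.pyGet? (pre ++ c :: p :: d :: rest) (pre.length : Int) = some c :=
      PySem.List.pyGet?_append_length _ _ _
    have e2 : PySem.List.pyGet? (pre ++ c :: p :: d :: rest) ((pre.length : Int) + 1) = some p := by
      simpa using PySem.List.pyGet?_append_right pre (c :: p :: d :: rest) 1
    have e3 : PySem.List.pyGet? (pre ++ c :: p :: d :: rest) ((pre.length : Int) + 2) = some d := by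
      simpa using PySem.List.pyGet?_append_right pre (c :: p :: d :: rest) 2
    rw [PySem.List.pyRange_one_cons (by simp only [List.length_cons]; push_cast; omega)]
    have s1 : aStep (pre ++ c :: p :: d :: rest) (acc, 0) (pre.length : Int) = (acc ++ [c], 0) := by
      unfold aStep
      rw [if_neg (by omega), e1]
      dsimp only
      refine if_neg ?_
      intro hc
      exact h ⟨hc.1, by simpa [e2] using hc.2.2.1, by simpa [e3] using hc.2.2.2⟩
    simp only [List.foldl_cons, s1]
    have H := ih (pre ++ [c]) (acc ++ [c])
    simp only [List.append_assoc, List.cons_append, List.nil_append, List.length_append,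
      List.length_cons, List.length_nil] at H
    simp only [List.length_cons]
    push_cast at H ⊢
    ring_nf at H ⊢
    rw [altGo.eq_4, if_neg h]
    exact H

-- ===== VERDICT (by name: the statement is the Claim_ definition above) =====
theorem decode_lucas_spec : Claim_equal_decode_lucas := by
  intro text _
  unfold Spec_decode_lucas decode_lucas decode_lucas_alt
  have hA := decode_loop_eq text.toList [] []
  simp at hA
  have hB := alt_eq_altGo text.toList
  simp only [hB]
  simp only [String.length_toList, hA]
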